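-- pv_equiv track=rewrite | github.com/paulozava/Python | CW_challenges/CW_combination_of_pin.py | possible_combinations
-- ===== SOURCE A (Python) =====
-- def possible_combinations(observed):
--     actions = {
--         '1': ['1', '2', '4'],
--         '2': ['1','2','3','5'],
--         '3': ['2', '3', '6'],
--         '4': ['1','4','5','7'],
--         '5': ['2', '4', '5', '6', '8'],
--         '6': ['3', '5', '6', '9'],
--         '7': ['4', '7', '8'],
--         '8': ['5', '7', '8', '9', '0'],
--         '9': ['6', '8', '9'],
--         '0': ['0', '8']}
--
--     response = ['']
--     for digit in observed:
--         possibilities = actions[digit]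
--         parcial_response = []
--         for possibility in possibilities:
--             new_parcial_response = [element + possibility for element in response]
--             parcial_response += new_parcial_response
--         response = parcial_response
--     return response
-- ===== SOURCE B (Python) =====
-- def possible_combinations(observed):
--     neighbors = {'1': '124', '2': '1235', '3': '236', '4': '1457',
--                  '5': '24568', '6': '3569', '7': '478', '8': '57890',
--                  '9': '689', '0': '08'}
--
--     def build(i):
--         if i == len(observed):
--             return ['']
--         tails = build(i + 1)
--         return [o + t for t in tails for o in neighbors[observed[i]]]
--
--     return build(0)
-- ===== Notes on version B (the rewrite author's own statement) =====
-- stated objective: simpler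
-- what changed: Replaces A's iterative rebuild of the whole candidate list once per digit (three nested loops with staged partial lists) with a short recursion on the string suffix: build the tails for the rest first, then prepend each neighbor of the current digit (inner loop over neighbors keeps the leftmost digit fastest-varying, matching A's order); the keypad is a dict of neighbor strings instead of lists.
import Mathlib
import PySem

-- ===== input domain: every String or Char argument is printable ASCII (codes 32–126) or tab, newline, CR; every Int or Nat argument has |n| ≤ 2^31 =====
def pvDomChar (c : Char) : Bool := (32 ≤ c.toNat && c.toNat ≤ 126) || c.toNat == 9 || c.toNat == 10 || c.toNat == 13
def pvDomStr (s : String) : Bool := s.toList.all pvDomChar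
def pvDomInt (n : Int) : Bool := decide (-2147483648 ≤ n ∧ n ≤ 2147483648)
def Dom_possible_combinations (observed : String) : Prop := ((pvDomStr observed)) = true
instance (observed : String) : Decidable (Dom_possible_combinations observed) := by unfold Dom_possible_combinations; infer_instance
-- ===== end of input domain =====

-- B replaces A's per-digit rebuild of the whole candidate list with a recursion on the
-- string suffix (build tails for the rest, prepend each neighbor); objective: simpler.
-- Strings are handled as List Char (String.mk at the end) so the kernel can unfold them.

-- ===== PORT A =====
-- the literal `actions` keypad dict A defines; `[]` for a non-digit key, where Python
-- raises KeyError (those inputs are excluded by Pre_).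
def pvActions (c : Char) : List (List Char) :=
  match c with
  | '1' => [['1'], ['2'], ['4']]
  | '2' => [['1'], ['2'], ['3'], ['5']]
  | '3' => [['2'], ['3'], ['6']]
  | '4' => [['1'], ['4'], ['5'], ['7']]
  | '5' => [['2'], ['4'], ['5'], ['6'], ['8']]
  | '6' => [['3'], ['5'], ['6'], ['9']]
  | '7' => [['4'], ['7'], ['8']]
  | '8' => [['5'], ['7'], ['8'], ['9'], ['0']]
  | '9' => [['6'], ['8'], ['9']]
  | '0' => [['0'], ['8']]
  | _ => []

def possible_combinations (observed : String) : List String :=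
  let response : List (List Char) :=
    observed.toList.foldl (fun response digit =>
      let possibilities := pvActions digit
      possibilities.foldl (fun parcial_response possibility =>
        parcial_response ++ response.map (fun element => element ++ possibility)) [])
      [[]]
  response.map String.mk

-- ===== PORT B =====
-- Source B's `neighbors` dict of neighbor STRINGS (a string's chars in Python's for-loop
-- become a List Char here); "" for a non-digit key (KeyError in Python, outside Pre_).
def pvNeighbors (c : Char) : List Char :=
  (match c with
   | '1' => "124"   | '2' => "1235" | '3' => "236"
   | '4' => "1457"  | '5' => "24568"| '6' => "3569"
   | '7' => "478"   | '8' => "57890"| '9' => "689"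
   | '0' => "08"    | _ => "").toList

-- Source B's recursive `build`, phrased structurally on the suffix of characters
-- (Python indexes with i; the suffix observed[i:] is the same data).
def pvBuild : List Char → List (List Char)
  | [] => [[]]
  | d :: rest =>
    (pvBuild rest).flatMap (fun t => (pvNeighbors d).map (fun o => o :: t))

def possible_combinations_alt (observed : String) : List String :=
  (pvBuild observed.toList).map String.mk

-- ===== PRECONDITION & SPEC =====
-- Python A raises KeyError on any character that is not an ASCII digit; Pre_ excludes those.
def Pre_possible_combinations (observed : String) : Prop :=
  (observed.toList.all Char.isDigit) = true
instance (observed : String) : Decidable (Pre_possible_combinations observed) := by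
  unfold Pre_possible_combinations; infer_instance
def pvWitness_possible_combinations : String := "529"

def Spec_possible_combinations (observed : String) (out : List String) : Prop :=
  out = possible_combinations_alt observed
instance (observed : String) (out : List String) : Decidable (Spec_possible_combinations observed out) := by
  unfold Spec_possible_combinations; infer_instance

-- ===== CLAIM =====
def Claim_equal_possible_combinations : Prop := ∀ (observed : String), Dom_possible_combinations observed → Pre_possible_combinations observed → Spec_possible_combinations observed (possible_combinations observed)

-- ===== LEMMAS AND PROOFS =====

-- A's actions list is B's neighbor chars, each wrapped as a singleton list
theorem pvActions_eq (c : Char) : pvActions c = (pvNeighbors c).map (fun o => [o]) := by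
  unfold pvActions pvNeighbors
  split <;> rfl

-- main invariant: A's left fold from any accumulator is B's suffix build, each tail
-- appended behind each accumulated element (A's loop order = tails outer, elements inner)
theorem pvFold_eq (ds : List Char) (resp : List (List Char)) :
    ds.foldl (fun response digit =>
        (pvActions digit).foldl (fun parcial p =>
          parcial ++ response.map (fun element => element ++ p)) []) resp =
      (pvBuild ds).flatMap (fun s => resp.map (fun e => e ++ s)) := by
  induction ds generalizing resp with
  | nil => simp [pvBuild]
  | cons d rest ih =>
    rw [List.foldl_cons, ih, pvBuild]
    rw [PySem.List.foldl_append_eq_flatMap, List.nil_append, pvActions_eq]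
    simp [List.flatMap_assoc, List.flatMap_map, List.map_flatMap, Function.comp_def,
      List.append_assoc]

-- ===== VERDICT =====
theorem possible_combinations_spec : Claim_equal_possible_combinations := by
  intro observed _ _
  unfold Spec_possible_combinations possible_combinations possible_combinations_alt
  rw [pvFold_eq]
  simp
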